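-- pv_equiv track=rewrite | github.com/LimitofIntegral/BOJ | new_solved/bfs/14562.py | bfs
-- ===== SOURCE A (Python) =====
-- from collections import deque
--
-- def bfs(s, t):
--     count = 0
--     q = deque([(s, t)])
--     while True:
--         count += 1
--         for _ in range(len(q)):
--             a, b = q.popleft()
--             if a * 2 == b + 3:
--                 return count
--             if a * 2 < b + 3:
--                 q.append((a * 2, b + 3))
--
--             if a + 1 == b:
--                 return count
--             else:
--                 q.append((a + 1, b))
-- ===== SOURCE B (Python) =====
-- def bfs(s, t):
--     # Iterative deepening: a depth-limited DFS recursion replaces A's BFS queue.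
--     # hit(a, b, d) = "some state exactly d moves below (a, b) satisfies the goal";
--     # the outer loop tries depths 0, 1, 2, ... so the first hit is the minimal level.
--     def hit(a, b, d):
--         if d == 0:
--             return a * 2 == b + 3 or a + 1 == b
--         if a * 2 < b + 3 and hit(a * 2, b + 3, d - 1):
--             return True
--         return hit(a + 1, b, d - 1)
--
--     d = 0
--     while True:
--         if hit(s, t, d):
--             return d + 1
--         d += 1
-- ===== Notes on version B (the rewrite author's own statement) =====
-- stated objective: alternative
-- what changed: Replaces A's queue-based level BFS with iterative deepening: a depth-limited DFS recursion hit(a,b,d) decides whether any state exactly d moves away is a goal, and the outer loop tries depths 0,1,2,..., so no queue or frontier is ever materialised (O(d) memory instead of A's exponential queue).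
import Mathlib
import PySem

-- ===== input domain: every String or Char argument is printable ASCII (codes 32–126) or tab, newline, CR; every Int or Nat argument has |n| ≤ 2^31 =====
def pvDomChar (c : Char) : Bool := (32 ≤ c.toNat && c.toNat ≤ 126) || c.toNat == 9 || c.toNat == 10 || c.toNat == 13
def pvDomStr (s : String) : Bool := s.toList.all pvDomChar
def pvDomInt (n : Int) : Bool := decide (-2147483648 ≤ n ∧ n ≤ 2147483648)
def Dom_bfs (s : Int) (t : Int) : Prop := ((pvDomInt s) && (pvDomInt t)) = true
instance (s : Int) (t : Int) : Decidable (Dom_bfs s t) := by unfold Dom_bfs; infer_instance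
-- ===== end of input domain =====

-- B replaces A's queue-based level BFS by iterative deepening (a depth-limited DFS
-- recursion, no queue; objective: alternative — O(d) memory, no speed claim). Both
-- loops are made total by the same fuel bound, which only guards termination
-- (the Pythons diverge where s ≥ t and 2s > t+3; the ports then both return the
-- level count reached when the fuel runs out, and still agree).

-- ===== PORT A =====
-- one pass of A's inner `for _ in range(len(q))` loop over the current level:
-- acc holds (reversed) what A appended so far; none = a `return count` fired,
-- some q' = the queue contents after the level. Tail-recursive (accumulator)
-- so the interpreter can run it on deep levels.
def bfsStepA : List (Int × Int) → List (Int × Int) → Option (List (Int × Int))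
  | [], acc => some acc.reverse
  | (a, b) :: rest, acc =>
    if a * 2 = b + 3 then none
    else
      let acc2 := if a * 2 < b + 3 then (a * 2, b + 3) :: acc else acc
      if a + 1 = b then none
      else bfsStepA rest ((a + 1, b) :: acc2)

-- fuel makes the `while True` loop total; wherever Python A returns it does so long before the fuel runs out.
def bfsFuel (s : Int) (t : Int) : Nat := (t - s).toNat + (t + 3 - 2 * s).toNat + 2

def bfsLoopA : Nat → List (Int × Int) → Int → Int
  | 0, _, count => count
  | fuel + 1, q, count =>
    match bfsStepA q [] with
    | none => count + 1
    | some q' => bfsLoopA fuel q' (count + 1)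

def bfs (s : Int) (t : Int) : Int := bfsLoopA (bfsFuel s t) [(s, t)] 0

-- ===== PORT B =====
-- hit a b d = "some state exactly d moves below (a,b) satisfies the goal"
def bfsHit : Nat → Int → Int → Bool
  | 0, a, b => a * 2 == b + 3 || a + 1 == b
  | d + 1, a, b =>
    if a * 2 < b + 3 && bfsHit d (a * 2) (b + 3) then true
    else bfsHit d (a + 1) b

-- the outer `while True` of B, made total by the same fuel bound as A's loop
def bfsLoopB : Nat → Int → Int → Nat → Int
  | 0, _, _, d => (d : Int)
  | fuel + 1, s, t, d => if bfsHit d s t then (d : Int) + 1 else bfsLoopB fuel s t (d + 1)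

def bfs_alt (s : Int) (t : Int) : Int := bfsLoopB (bfsFuel s t) s t 0

-- ===== PRECONDITION & SPEC =====
def Spec_bfs (s : Int) (t : Int) (out : Int) : Prop := out = bfs_alt s t
instance (s : Int) (t : Int) (out : Int) : Decidable (Spec_bfs s t out) := by unfold Spec_bfs; infer_instance

-- ===== CLAIM (what is proved, stated in full; the proofs are below) =====
def Claim_equal_bfs : Prop := ∀ (s : Int) (t : Int), Dom_bfs s t → Spec_bfs s t (bfs s t)

-- ===== LEMMAS AND PROOFS =====

def bfsCond (p : Int × Int) : Bool := p.1 * 2 == p.2 + 3 || p.1 + 1 == p.2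

def bfsChildren (p : Int × Int) : List (Int × Int) :=
  (if p.1 * 2 < p.2 + 3 then [(p.1 * 2, p.2 + 3)] else []) ++ [(p.1 + 1, p.2)]

-- the d-th BFS level, as d iterations of flatMap bfsChildren
def levelIter : Nat → List (Int × Int) → List (Int × Int)
  | 0, q => q
  | d + 1, q => levelIter d (q.flatMap bfsChildren)

theorem levelIter_succ' (d : Nat) :
    ∀ q : List (Int × Int), levelIter (d + 1) q = (levelIter d q).flatMap bfsChildren := by
  induction d with
  | zero => intro q; rfl
  | succ n ih => intro q; exact ih (q.flatMap bfsChildren)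

-- bfsStepA fires a `return` exactly when some state of the level satisfies the condition
theorem bfsStepA_none_iff (q : List (Int × Int)) :
    ∀ acc, bfsStepA q acc = none ↔ ∃ p ∈ q, bfsCond p = true := by
  induction q with
  | nil => intro acc; simp [bfsStepA]
  | cons hd tl ih =>
    intro acc
    obtain ⟨a, b⟩ := hd
    by_cases h1 : a * 2 = b + 3
    · simp only [bfsStepA, if_pos h1, true_iff]
      exact ⟨(a, b), List.mem_cons_self, by simp [bfsCond, h1]⟩
    · by_cases h2 : a + 1 = b
      · simp only [bfsStepA, if_neg h1, if_pos h2, true_iff]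
        exact ⟨(a, b), List.mem_cons_self, by simp [bfsCond, h2]⟩
      · simp only [bfsStepA, if_neg h1, if_neg h2]
        rw [ih]
        constructor
        · rintro ⟨p, hp, hc⟩
          exact ⟨p, List.mem_cons_of_mem _ hp, hc⟩
        · rintro ⟨p, hp, hc⟩
          rcases List.mem_cons.mp hp with rfl | hmem
          · simp [bfsCond, h1, h2] at hc
          · exact ⟨p, hmem, hc⟩

-- when no `return` fires, the next level is what was already appended plus the children
theorem bfsStepA_some (q : List (Int × Int)) :
    ∀ acc, (∀ p ∈ q, bfsCond p = false) →
    bfsStepA q acc = some (acc.reverse ++ q.flatMap bfsChildren) := by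
  induction q with
  | nil => intro acc _; simp [bfsStepA]
  | cons hd tl ih =>
    intro acc h
    obtain ⟨a, b⟩ := hd
    have hhd := h (a, b) List.mem_cons_self
    simp only [bfsCond, Bool.or_eq_false_iff, beq_eq_false_iff_ne, ne_eq] at hhd
    simp only [bfsStepA, if_neg hhd.1, if_neg hhd.2]
    rw [ih _ (fun p hp => h p (List.mem_cons_of_mem _ hp))]
    by_cases hd2 : a * 2 < b + 3 <;>
      simp [hd2, bfsChildren, List.flatMap_cons, List.append_assoc]

-- hit at depth d+1 = hit at depth d over the children
theorem bfsHit_succ (d : Nat) (a b : Int) :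
    bfsHit (d + 1) a b = (bfsChildren (a, b)).any (fun p => bfsHit d p.1 p.2) := by
  by_cases h : a * 2 < b + 3 <;>
    simp [bfsHit, bfsChildren, h, Bool.or_comm]

-- pushing one flatMap through `any` raises the hit depth by one
theorem any_flatMap_hit (d : Nat) (q : List (Int × Int)) :
    (q.flatMap bfsChildren).any (fun p => bfsHit d p.1 p.2)
      = q.any (fun p => bfsHit (d + 1) p.1 p.2) := by
  induction q with
  | nil => rfl
  | cons hd tl ih =>
    obtain ⟨a, b⟩ := hd
    simp only [List.flatMap_cons, List.any_append, List.any_cons, ih, bfsHit_succ]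

-- the goal condition holds somewhere on level d iff a depth-d DFS from the root hits
theorem any_levelIter (d : Nat) :
    ∀ q : List (Int × Int),
      (levelIter d q).any bfsCond = q.any (fun p => bfsHit d p.1 p.2) := by
  induction d with
  | zero =>
    intro q
    have : ∀ p : Int × Int, bfsCond p = bfsHit 0 p.1 p.2 := by rintro ⟨a, b⟩; rfl
    simp only [levelIter]
    induction q with
    | nil => rfl
    | cons hd tl ihq => simp [List.any_cons, ihq, this]
  | succ n ih =>
    intro q
    simp only [levelIter]
    rw [ih, any_flatMap_hit]

-- main invariant: A's loop on the d-th level with count = d equals B's loop at depth d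
theorem loop_eq (fuel : Nat) :
    ∀ (s t : Int) (d : Nat),
      bfsLoopA fuel (levelIter d [(s, t)]) (d : Int) = bfsLoopB fuel s t d := by
  induction fuel with
  | zero => intro s t d; rfl
  | succ n ih =>
    intro s t d
    have hroot : (levelIter d [(s, t)]).any bfsCond = bfsHit d s t := by
      rw [any_levelIter]; simp
    simp only [bfsLoopA, bfsLoopB]
    by_cases hh : bfsHit d s t
    · have hnone : bfsStepA (levelIter d [(s, t)]) [] = none := by
        rw [bfsStepA_none_iff]
        exact List.any_eq_true.mp (hroot.trans (by rw [hh]))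
      rw [hnone, if_pos hh]
    · have hall : ∀ p ∈ levelIter d [(s, t)], bfsCond p = false := by
        intro p hp
        by_contra hc
        exact hh (hroot ▸ List.any_eq_true.mpr ⟨p, hp, by simpa using Bool.not_eq_false _ |>.mp hc⟩)
      have hsome : bfsStepA (levelIter d [(s, t)]) []
          = some ((levelIter d [(s, t)]).flatMap bfsChildren) := by
        rw [bfsStepA_some _ _ hall]; simp
      rw [hsome, if_neg (by simpa using hh)]
      have := ih s t (d + 1)
      rw [levelIter_succ'] at this
      rw [show ((d : Int) + 1) = ((d + 1 : Nat) : Int) by push_cast; ring]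
      exact this

-- ===== VERDICT (by name: the statement is the Claim_ definition above) =====
theorem bfs_spec : Claim_equal_bfs := by
  intro s t _
  unfold Spec_bfs bfs bfs_alt
  exact loop_eq (bfsFuel s t) s t 0
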